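-- pv_equiv track=rewrite | github.com/schmidtfrk/master-thesis-scripts | bsm_lib.py | erasure
-- ===== SOURCE A (Python) =====
-- import itertools
--
-- def create_logicals(stabilizer,log):
--     """ Creates all logical operators if one represantive is given. """
--     liste=list(span_generator_mod2(stabilizer))
--     if liste!=[]:
--         for i in liste:
--             for j in range(len(i)):
--                 i[j]+=log[j]
--                 i[j]%=2
--     else:
--         liste.append(log)
--     return liste
--
-- def create_erasure_patterns(numberofqubits):
--     """ Creates a list of all possible erasure patterns with numberofqubits
--         qubits, which is more efficient than
--         list(span_generator_mod2(ones(numberofqubits)))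
--     """
--     y=[[int(x) for x in list('{0:0b}'.format(i))]for i in range(2**numberofqubits)]
--     length=len(y[-1])
--     for i in y:
--         while len(i)<length:
--             i.insert(0,0)
--     return y
--
-- def span_generator_mod2(liste):
--     """ Takes a list of vectors and returns all linearcombinations(modulo 2)
--
--         Input:
--         liste: list of lists of numbers
--
--         Output:
--         generator of Lists of numbers
--     """
--     if liste==[]:
--         return liste
--     n = len(liste[0])
--     transpose = list(zip(*liste))
--     coefficients = itertools.product(range(2), repeat=len(liste))
--     for coeff in coefficients:
--         yield [sum((a * c) for a, c in zip(transpose[i], coeff)) % 2 for i in range(n)]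
--
-- def erasure(xstabilizer,xlog,zstabilizer,zlog):
--     """ Counts uncorrectable losses.
--         It assumes a [n,1,d]-CSS(C_X,C_Z)-code.
--
--         Input:
--         xstablizer: list of lists of the support of the X-stabilizer
--                     generators (0 ist qubit not in support ,1 otherwise)
--         xlog: list of the support of one representative of logical X-operators
--         zstablizer: list of lists of the support of the Z-stabilizer
--                     generators (0 ist qubit not in support ,1 otherwise)
--         zlog: list of the support of one representative of logical Z-operators
--
--         Output:
--         dummy: List of integers counting uncorrectable errors
--     """
--     xlogical=create_logicals(xstabilizer,xlog)
--     zlogical=create_logicals(zstabilizer,zlog)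
--     n=len(xstabilizer[0])
--     dummy=[0]*(n+1)
--     xerrors=[]
--     errors=create_erasure_patterns(n)
--     for i in range(len(errors)):
--         breakvar=0
--         for j in range(len(xlogical)):
--             breakvarx=0
--             for k in range(n):
--                 if 1==xlogical[j][k]:
--                     if 1!=errors[i][k]:
--                         breakvarx=1
--             if 0==breakvarx:
--                 xerrors.append(errors[i])
--                 breakvar=1
--                 break
--         if breakvar==0:
--             for j in range(len(zlogical)):
--                 breakvarz=0
--                 for k in range(n):
--                     if 1==zlogical[j][k]:
--                         if 1!=errors[i][k]:
--                             breakvarz=1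
--                 if 0==breakvarz:
--                     xerrors.append(errors[i])
--                     break
--     for i in range(len(xerrors)):
--         dummy[sum(xerrors[i])]+=1
--     return dummy
-- ===== SOURCE B (Python) =====
-- def erasure(xstabilizer, xlog, zstabilizer, zlog):
--     """Bitmask re-implementation: logical supports as big-endian bitmasks (span
--     built by XOR-doubling over a set, deduplicated), erasure patterns as the
--     integers 0..2^n-1, coverage = bitwise subset test, binned by popcount."""
--     n = len(xstabilizer[0])
--
--     def parity_mask(vec):
--         m = 0
--         for k in range(n):
--             m = 2 * m + (vec[k] % 2)
--         return m
--
--     def one_mask(vec):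
--         m = 0
--         for k in range(n):
--             m = 2 * m + (1 if vec[k] == 1 else 0)
--         return m
--
--     def logical_masks(stab, log):
--         if not stab:
--             # no stabilizer generators: the only representative is log itself
--             return {one_mask(log)}
--         span = {0}
--         for row in stab:
--             r = parity_mask(row)
--             span |= {s ^ r for s in span}
--         lp = parity_mask(log)
--         return {s ^ lp for s in span}
--
--     masks = logical_masks(xstabilizer, xlog) | logical_masks(zstabilizer, zlog)
--     dummy = [0] * (n + 1)
--     for e in range(1 << n):
--         if any(m & e == m for m in masks):
--             w = 0
--             t = e
--             while t:
--                 w += t % 2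
--                 t //= 2
--             dummy[w] += 1
--     return dummy
-- ===== Notes on version B (the rewrite author's own statement) =====
-- stated objective: faster
-- what changed: B replaces A's scan of all 2^#stabilizer logical-operator lists (rebuilt per pattern with an inner per-qubit loop) by bitmask arithmetic: logical supports become big-endian integer masks, the span is built once by XOR-doubling over a deduplicating set, each erasure pattern is just the integer e, coverage is the bitwise subset test m & e == m, and bins are indexed by popcount.
-- outside the precondition, e.g. on erasure([[-1, 2], [0, 2, 1]], [2, 0], [[0]], [1]): A returns [1, 2, 1], B raises IndexError
import Mathlib
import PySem

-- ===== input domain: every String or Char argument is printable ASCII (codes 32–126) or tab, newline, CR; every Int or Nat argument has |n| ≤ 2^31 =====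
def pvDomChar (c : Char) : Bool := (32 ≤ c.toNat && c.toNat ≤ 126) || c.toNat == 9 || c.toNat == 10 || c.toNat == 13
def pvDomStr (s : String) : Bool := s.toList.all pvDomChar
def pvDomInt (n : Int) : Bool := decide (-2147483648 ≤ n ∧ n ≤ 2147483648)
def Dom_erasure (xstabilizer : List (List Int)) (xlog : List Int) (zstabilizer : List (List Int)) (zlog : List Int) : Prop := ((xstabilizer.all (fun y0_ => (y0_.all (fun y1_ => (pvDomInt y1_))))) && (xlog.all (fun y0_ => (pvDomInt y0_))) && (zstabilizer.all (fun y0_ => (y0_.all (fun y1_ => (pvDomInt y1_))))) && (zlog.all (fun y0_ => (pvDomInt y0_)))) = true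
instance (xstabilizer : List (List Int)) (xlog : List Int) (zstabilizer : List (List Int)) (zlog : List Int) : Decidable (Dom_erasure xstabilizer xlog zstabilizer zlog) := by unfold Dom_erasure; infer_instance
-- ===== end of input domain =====

-- B replaces A's triple-nested scan of all 2^(#stab) logical-operator lists over all 2^n erasure
-- patterns by deduplicated bitmask arithmetic: logical supports become big-endian bitmasks (the span
-- built by XOR-doubling over a set), a pattern is the integer e itself, coverage is a bitwise subset
-- test, and the bins are indexed by popcount (objective: faster).

-- ===== PORT A =====

-- itertools.product(range(2), repeat=s) (first coordinate varies slowest)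
def coeffTuples : Nat → List (List Int)
  | 0 => [[]]
  | s+1 => ((coeffTuples s).map (fun t => 0 :: t)) ++ ((coeffTuples s).map (fun t => 1 :: t))

-- sum(a*c for a, c in zip(transpose[i], coeff)); row.getD i 0 is transpose[i][j] = liste[j][i],
-- exact because Pre_ keeps i below every row length
def pyColSum (liste : List (List Int)) (coeff : List Int) (i : Nat) : Int :=
  ((liste.map (fun row => row.getD i 0)).zip coeff).foldl (fun a p => a + p.1 * p.2) 0

-- span_generator_mod2, materialized (A's caller does list(...) at once)
def spanList (liste : List (List Int)) : List (List Int) :=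
  if liste = [] then []
  else
    (coeffTuples liste.length).map (fun coeff =>
      (List.range (liste.headD []).length).map (fun i => PySem.Int.mod (pyColSum liste coeff i) 2))

-- create_logicals
def createLogicals (stab : List (List Int)) (log : List Int) : List (List Int) :=
  if spanList stab ≠ [] then
    -- i[j] += log[j]; i[j] %= 2 — log.getD j 0 is log[j], exact under Pre_ (j < log.length)
    (spanList stab).map (fun v =>
      (List.range v.length).map (fun j => PySem.Int.mod (v.getD j 0 + log.getD j 0) 2))
  else [log]

-- [int(x) for x in list('{0:0b}'.format(i))] — i ≥ 0, so the chars are digits and int(c) = c - '0'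
def binRow (i : Nat) : List Int :=
  (PySem.Int.toBinChars (i : Int)).map (fun c => (c.toNat : Int) - 48)

-- create_erasure_patterns (the while/insert(0,0) loop left-pads with zeros)
def createErasurePatterns (numberofqubits : Nat) : List (List Int) :=
  let y := (List.range (2 ^ numberofqubits)).map binRow
  let len := ((y.getLast?).getD []).length
  y.map (fun r => List.replicate (len - r.length) 0 ++ r)

-- the k-loop computing breakvarx/breakvarz (getD is exact: Pre_ keeps k below both lengths)
def breakFlag (lg err : List Int) (n : Nat) : Int :=
  (List.range n).foldl
    (fun bv k => if lg.getD k 0 == 1 then (if err.getD k 0 == 1 then bv else 1) else bv) 0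

-- the j-loop that breaks on the first logical with flag 0
def scanLogs (logs : List (List Int)) (err : List Int) (n : Nat) : Bool :=
  logs.any (fun lg => breakFlag lg err n == 0)

def erasure (xstabilizer : List (List Int)) (xlog : List Int) (zstabilizer : List (List Int)) (zlog : List Int) : List Int :=
  let xlogical := createLogicals xstabilizer xlog
  let zlogical := createLogicals zstabilizer zlog
  let n := (xstabilizer.headD []).length   -- len(xstabilizer[0]); IndexError when empty, excluded by Pre_
  let errors := createErasurePatterns n
  let xerrors := errors.foldl (fun acc err =>
      if scanLogs xlogical err n then acc ++ [err]
      else if scanLogs zlogical err n then acc ++ [err]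
      else acc) ([] : List (List Int))
  xerrors.foldl
    (fun d err => PySem.List.pySetD d err.sum (PySem.List.pyGetD d err.sum 0 + 1))
    (List.replicate (n+1) (0 : Int))

-- ===== PORT B =====

-- parity_mask: m = 2*m + vec[k] % 2 (the % 2 value is 0 or 1, kept as a Nat mask bit)
def parityMask (n : Nat) (vec : List Int) : Nat :=
  (List.range n).foldl (fun m k => 2 * m + (PySem.Int.mod (vec.getD k 0) 2).toNat) 0

-- one_mask: m = 2*m + (1 if vec[k] == 1 else 0)
def oneMask (n : Nat) (vec : List Int) : Nat :=
  (List.range n).foldl (fun m k => 2 * m + (if vec.getD k 0 == 1 then 1 else 0)) 0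

-- logical_masks
def logicalMasks (n : Nat) (stab : List (List Int)) (log : List Int) : PySem.Set Nat :=
  if stab = [] then PySem.Set.ofList [oneMask n log]
  else
    PySem.Set.ofList
      ((stab.foldl
        (fun sp row => PySem.Set.union sp (sp.map (fun s => s ^^^ parityMask n row)))
        (PySem.Set.ofList [0])).map (fun s => s ^^^ parityMask n log))

-- the popcount while-loop (w += t % 2; t //= 2); fuel e makes the recursion structural (e/2 < e)
def popcntGo : Nat → Nat → Nat
  | _, 0 => 0
  | 0, _ => 0
  | f+1, e => e % 2 + popcntGo f (e / 2)

def popcnt (e : Nat) : Nat := popcntGo e e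

def erasure_alt (xstabilizer : List (List Int)) (xlog : List Int) (zstabilizer : List (List Int)) (zlog : List Int) : List Int :=
  let n := (xstabilizer.headD []).length
  let masks := PySem.Set.union (logicalMasks n xstabilizer xlog) (logicalMasks n zstabilizer zlog)
  (List.range (2 ^ n)).foldl
    (fun d e =>
      if masks.any (fun m => m &&& e == m) then
        d.set (popcnt e) (d.getD (popcnt e) 0 + 1)
      else d)
    (List.replicate (n+1) (0 : Int))

-- ===== PRECONDITION & SPEC =====
-- Pre_ excludes inputs whose row/operator lengths are inconsistent with the leading row lengths:
-- on those A usually raises IndexError, and on the few where A still returns (the too-short Z data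
-- is never reached because every pattern is already X-covered) B's own indexing raises instead.
def Pre_erasure (xstabilizer : List (List Int)) (xlog : List Int) (zstabilizer : List (List Int)) (zlog : List Int) : Prop :=
  xstabilizer ≠ [] ∧
  (∀ r ∈ xstabilizer, (xstabilizer.headD []).length ≤ r.length) ∧
  (xstabilizer.headD []).length ≤ xlog.length ∧
  (if zstabilizer = [] then (xstabilizer.headD []).length ≤ zlog.length
   else (xstabilizer.headD []).length ≤ (zstabilizer.headD []).length ∧
        (∀ r ∈ zstabilizer, (zstabilizer.headD []).length ≤ r.length) ∧
        (zstabilizer.headD []).length ≤ zlog.length)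

instance (xstabilizer : List (List Int)) (xlog : List Int) (zstabilizer : List (List Int)) (zlog : List Int) : Decidable (Pre_erasure xstabilizer xlog zstabilizer zlog) := by
  unfold Pre_erasure; infer_instance

def pvWitness_erasure : List (List Int) × List Int × List (List Int) × List Int :=
  ([[1, 0, 1], [0, 1, 1]], [1, 1, 1], [[1, 1, 1]], [1, 0, 0])

def Spec_erasure (xstabilizer : List (List Int)) (xlog : List Int) (zstabilizer : List (List Int)) (zlog : List Int) (out : List Int) : Prop := out = erasure_alt xstabilizer xlog zstabilizer zlog
instance (xstabilizer : List (List Int)) (xlog : List Int) (zstabilizer : List (List Int)) (zlog : List Int) (out : List Int) : Decidable (Spec_erasure xstabilizer xlog zstabilizer zlog out) := by unfold Spec_erasure; infer_instance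

-- ===== CLAIM (what is proved, stated in full; the proofs are below) =====
def Claim_equal_erasure : Prop := ∀ (xstabilizer : List (List Int)) (xlog : List Int) (zstabilizer : List (List Int)) (zlog : List Int), Dom_erasure xstabilizer xlog zstabilizer zlog → Pre_erasure xstabilizer xlog zstabilizer zlog → Spec_erasure xstabilizer xlog zstabilizer zlog (erasure xstabilizer xlog zstabilizer zlog)

-- ===== LEMMAS AND PROOFS =====

-- ---- generic big-endian mask building ----
def mkMask (n : Nat) (f : Nat → Nat) : Nat :=
  (List.range n).foldl (fun m k => 2 * m + f k) 0

lemma mkMask_succ (n : Nat) (f : Nat → Nat) : mkMask (n+1) f = 2 * mkMask n f + f n := by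
  simp [mkMask, List.range_succ]

lemma testBit_mkMask (n : Nat) (f : Nat → Nat) (hf : ∀ k, f k ≤ 1) (j : Nat) :
    (mkMask n f).testBit j = (decide (j < n) && decide (f (n - 1 - j) = 1)) := by
  induction n generalizing j with
  | zero => simp [mkMask]
  | succ n ih =>
    rw [mkMask_succ]
    cases j with
    | zero =>
      have hfn := hf n
      rcases (by omega : f n = 0 ∨ f n = 1) with h | h <;>
        simp [Nat.testBit_zero, h]
    | succ j =>
      have hfn := hf n
      rw [Nat.testBit_add_one]
      have hdiv : (2 * mkMask n f + f n) / 2 = mkMask n f := by omega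
      rw [hdiv, ih]
      have : n + 1 - 1 - (j + 1) = n - 1 - j := by omega
      rw [this]
      by_cases h : j < n <;> simp [h]

lemma parityMask_eq (n : Nat) (v : List Int) :
    parityMask n v = mkMask n (fun k => (PySem.Int.mod (v.getD k 0) 2).toNat) := rfl

lemma oneMask_eq (n : Nat) (v : List Int) :
    oneMask n v = mkMask n (fun k => if v.getD k 0 == 1 then 1 else 0) := rfl

lemma testBit_oneMask (n : Nat) (v : List Int) (j : Nat) :
    (oneMask n v).testBit j = (decide (j < n) && decide (v.getD (n - 1 - j) 0 = 1)) := by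
  rw [oneMask_eq, testBit_mkMask _ _ (fun k => by split <;> omega)]
  congr 1
  rw [decide_eq_decide]
  by_cases h : v.getD (n - 1 - j) 0 = 1 <;> simp [beq_iff_eq]

lemma testBit_parityMask (n : Nat) (v : List Int) (j : Nat) :
    (parityMask n v).testBit j = (decide (j < n) && decide (PySem.Int.mod (v.getD (n - 1 - j) 0) 2 = 1)) := by
  rw [parityMask_eq, testBit_mkMask]
  · congr 1
    rw [decide_eq_decide]
    have h0 : (0:Int) ≤ PySem.Int.mod (v.getD (n - 1 - j) 0) 2 := PySem.Int.mod_nonneg _ (by omega)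
    have h2 : PySem.Int.mod (v.getD (n - 1 - j) 0) 2 < 2 := PySem.Int.mod_lt _ (by omega)
    rcases (by omega : PySem.Int.mod (v.getD (n - 1 - j) 0) 2 = 0 ∨
        PySem.Int.mod (v.getD (n - 1 - j) 0) 2 = 1) with h | h <;> rw [h] <;> decide
  · intro k
    have h0 : (0:Int) ≤ PySem.Int.mod (v.getD k 0) 2 := PySem.Int.mod_nonneg _ (by omega)
    have h2 : PySem.Int.mod (v.getD k 0) 2 < 2 := PySem.Int.mod_lt _ (by omega)
    omega

-- ---- popcnt ----
lemma popcntGo_congr (e : Nat) : ∀ f₁ f₂, e ≤ f₁ → e ≤ f₂ → popcntGo f₁ e = popcntGo f₂ e := by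
  induction e using Nat.strong_induction_on with
  | _ e ih =>
    intro f₁ f₂ h₁ h₂
    match e, f₁, f₂ with
    | 0, f₁, f₂ => cases f₁ <;> cases f₂ <;> rfl
    | e+1, g₁+1, g₂+1 =>
      show (e+1) % 2 + popcntGo g₁ ((e+1)/2) = (e+1) % 2 + popcntGo g₂ ((e+1)/2)
      rw [ih ((e+1)/2) (by omega) g₁ g₂ (by omega) (by omega)]

lemma popcnt_step (e : Nat) : popcnt e = e % 2 + popcnt (e / 2) := by
  cases e with
  | zero => rfl
  | succ e =>
    show (e+1) % 2 + popcntGo e ((e+1)/2) = (e+1) % 2 + popcnt ((e+1)/2)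
    rw [popcntGo_congr ((e+1)/2) e ((e+1)/2) (by omega) (by omega)]
    rfl

-- ---- the pattern list ----
def bitVec (w j : Nat) : List Int :=
  (List.range w).map (fun k => if j.testBit (w - 1 - k) then 1 else 0)

def pat (n i : Nat) : List Int := if n = 0 then [0] else bitVec n i

-- characterisation of Nat.toDigits 2 (charBits is proof-side only)
def charBits (n : Nat) : List Char :=
  if n < 2 then [Nat.digitChar n] else charBits (n / 2) ++ [Nat.digitChar (n % 2)]
decreasing_by exact Nat.div_lt_self (by omega) (by omega)

def myBits (n : Nat) : List Int :=
  if n < 2 then [(n : Int)] else myBits (n / 2) ++ [((n % 2 : Nat) : Int)]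
decreasing_by exact Nat.div_lt_self (by omega) (by omega)

lemma toDigitsCore_two (fuel : Nat) : ∀ (n : Nat) (ds : List Char), 0 < fuel → n < 2 ^ fuel →
    Nat.toDigitsCore 2 fuel n ds = charBits n ++ ds := by
  induction fuel with
  | zero => intro n ds h _; exact absurd h (by omega)
  | succ fuel ih =>
    intro n ds _ hlt
    by_cases h : n / 2 = 0
    · have hn2 : n < 2 := by omega
      rw [charBits, if_pos hn2]
      simp [Nat.toDigitsCore, h, Nat.mod_eq_of_lt hn2]
    · have hn2 : ¬ n < 2 := by omega
      have hfpos : 0 < fuel := by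
        rcases Nat.eq_zero_or_pos fuel with hf | hf
        · subst hf; simp at hlt; omega
        · exact hf
      have hdiv : n / 2 < 2 ^ fuel := by
        have hp : (2:Nat) ^ (fuel+1) = 2 ^ fuel * 2 := by rw [pow_succ]
        omega
      rw [charBits, if_neg hn2]
      simp only [Nat.toDigitsCore, h]
      rw [ih (n/2) _ hfpos hdiv]
      simp

lemma charBits_map (i : Nat) :
    (charBits i).map (fun c => (c.toNat : Int) - 48) = myBits i := by
  induction i using Nat.strong_induction_on with
  | _ i ih =>
    rw [charBits, myBits]
    by_cases h : i < 2
    · rw [if_pos h, if_pos h]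
      interval_cases i <;> decide
    · rw [if_neg h, if_neg h, List.map_append, ih (i/2) (by omega)]
      congr 1
      rcases Nat.mod_two_eq_zero_or_one i with h2 | h2 <;> rw [h2] <;> decide

lemma binRow_eq_myBits (i : Nat) : binRow i = myBits i := by
  unfold binRow
  have h1 : PySem.Int.toBinChars (i : Int) = Nat.toDigits 2 i := by
    simp [PySem.Int.toBinChars]
  rw [h1]
  show (Nat.toDigitsCore 2 (i+1) i []).map _ = _
  rw [toDigitsCore_two (i+1) i [] (by omega) (by
    calc i < 2 ^ i := Nat.lt_two_pow_self
    _ ≤ 2 ^ (i+1) := Nat.pow_le_pow_right (by omega) (by omega))]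
  rw [List.append_nil, charBits_map]

lemma length_myBits_pow (n : Nat) (h : 1 ≤ n) : (myBits (2 ^ n - 1)).length = n := by
  induction n with
  | zero => exact absurd h (by omega)
  | succ n ih =>
    rcases Nat.eq_zero_or_pos n with hn | hn
    · subst hn; rw [myBits]; simp
    · have hp : (2:Nat) ^ (n+1) = 2 ^ n * 2 := by rw [pow_succ]
      have h2 : (2:Nat) ≤ 2 ^ n := by
        calc (2:Nat) = 2 ^ 1 := rfl
        _ ≤ 2 ^ n := Nat.pow_le_pow_right (by omega) hn
      rw [myBits, if_neg (by omega)]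
      have harg : (2 ^ (n+1) - 1) / 2 = 2 ^ n - 1 := by omega
      rw [harg]
      simp [ih hn]

lemma bitVec_zero_right (w : Nat) : bitVec w 0 = List.replicate w 0 := by
  simp [bitVec, Nat.zero_testBit, List.map_const']

lemma bitVec_succ (w j : Nat) :
    bitVec (w+1) j = bitVec w (j / 2) ++ [((j % 2 : Nat) : Int)] := by
  unfold bitVec
  rw [List.range_succ, List.map_append]
  congr 1
  · apply List.map_congr_left
    intro k hk
    rw [List.mem_range] at hk
    have h1 : w + 1 - 1 - k = (w - 1 - k) + 1 := by omega
    rw [h1, Nat.testBit_add_one]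
  · have : w + 1 - 1 - w = 0 := by omega
    simp only [List.map_cons, List.map_nil, this]
    rcases Nat.mod_two_eq_zero_or_one j with h | h <;>
      simp [Nat.testBit_zero, h]

lemma pad_myBits_eq_bitVec (w : Nat) : ∀ j : Nat, 1 ≤ w → j < 2 ^ w →
    List.replicate (w - (myBits j).length) 0 ++ myBits j = bitVec w j := by
  induction w with
  | zero => intro j h _; exact absurd h (by omega)
  | succ w ih =>
    intro j _ hj
    rcases Nat.eq_zero_or_pos w with hw | hw
    · subst hw
      have : j < 2 := by simpa using hj
      rw [myBits, if_pos this]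
      interval_cases j <;> decide
    · by_cases h2 : j < 2
      · rw [myBits, if_pos h2, bitVec_succ]
        have hj2 : j / 2 = 0 := by omega
        rw [hj2, bitVec_zero_right]
        have hm : j % 2 = j := Nat.mod_eq_of_lt h2
        rw [hm]
        simp
      · rw [myBits, if_neg h2, bitVec_succ]
        have hp : (2:Nat) ^ (w+1) = 2 ^ w * 2 := by rw [pow_succ]
        have hdiv : j / 2 < 2 ^ w := by omega
        rw [← ih (j/2) hw hdiv]
        rw [List.length_append, List.length_singleton]
        have hlen : w + 1 - ((myBits (j/2)).length + 1) = w - (myBits (j/2)).length := by omega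
        rw [hlen, List.append_assoc]

lemma patterns_eq (n : Nat) :
    createErasurePatterns n = (List.range (2 ^ n)).map (pat n) := by
  rcases Nat.eq_zero_or_pos n with hn | hn
  · subst hn; decide
  · have hN : 0 < 2 ^ n := Nat.two_pow_pos n
    have hr : List.range (2 ^ n) = List.range (2 ^ n - 1) ++ [2 ^ n - 1] := by
      conv_lhs => rw [show (2:Nat) ^ n = (2 ^ n - 1) + 1 by omega]
      rw [List.range_succ]
    have hlast : (((List.range (2 ^ n)).map binRow).getLast?).getD [] = binRow (2 ^ n - 1) := by
      rw [hr, List.map_append]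
      simp
    show List.map
        (fun r => List.replicate (((((List.range (2 ^ n)).map binRow).getLast?.getD []).length) - r.length) 0 ++ r)
        ((List.range (2 ^ n)).map binRow) = List.map (pat n) (List.range (2 ^ n))
    rw [hlast]
    have hlen : (binRow (2 ^ n - 1)).length = n := by
      rw [binRow_eq_myBits]; exact length_myBits_pow n hn
    rw [hlen, List.map_map]
    apply List.map_congr_left
    intro i hi
    rw [List.mem_range] at hi
    show List.replicate (n - (binRow i).length) 0 ++ binRow i = pat n i
    rw [binRow_eq_myBits, pat, if_neg (by omega)]
    exact pad_myBits_eq_bitVec n i hn hi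

lemma sum_bitVec (n : Nat) : ∀ i : Nat, i < 2 ^ n → (bitVec n i).sum = ((popcnt i : Nat) : Int) := by
  induction n with
  | zero =>
    intro i hi
    have : i = 0 := by simpa using hi
    subst this; decide
  | succ n ih =>
    intro i hi
    have hp : (2:Nat) ^ (n+1) = 2 ^ n * 2 := by rw [pow_succ]
    rw [bitVec_succ, List.sum_append]
    simp only [List.sum_cons, List.sum_nil, add_zero]
    rw [ih (i/2) (by omega), popcnt_step i]
    push_cast
    ring

lemma sum_pat (n i : Nat) (h : i < 2 ^ n) : (pat n i).sum = ((popcnt i : Nat) : Int) := by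
  rcases Nat.eq_zero_or_pos n with hn | hn
  · subst hn
    have : i = 0 := by simpa using h
    subst this; decide
  · rw [pat, if_neg (by omega)]
    exact sum_bitVec n i h

lemma getD_bitVec (w j k : Nat) (h : k < w) :
    (bitVec w j).getD k 0 = if j.testBit (w - 1 - k) then 1 else 0 := by
  exact PySem.List.getD_map_range _ _ _ _ h

-- ---- flags and the subset test ----
lemma foldl_if_one (l : List Nat) (p : Nat → Bool) (b : Int) :
    l.foldl (fun bv k => if p k then 1 else bv) b = if l.any p then 1 else b := by
  induction l generalizing b with
  | nil => simp
  | cons a l ih => by_cases h : p a <;> simp [h, ih]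

lemma breakFlag_eq_zero_iff (lg err : List Int) (n : Nat) :
    (breakFlag lg err n = 0) ↔ (∀ k, k < n → lg.getD k 0 = 1 → err.getD k 0 = 1) := by
  unfold breakFlag
  have hbody : (fun (bv : Int) k => if lg.getD k 0 == 1 then (if err.getD k 0 == 1 then bv else 1) else bv)
      = fun (bv : Int) k => if (lg.getD k 0 == 1 && !(err.getD k 0 == 1)) then 1 else bv := by
    funext bv k
    cases hb1 : (lg.getD k 0 == 1) <;> cases hb2 : (err.getD k 0 == 1) <;> simp
  rw [hbody, foldl_if_one]
  by_cases h : ((List.range n).any fun k => lg.getD k 0 == 1 && !(err.getD k 0 == 1)) = true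
  · rw [if_pos h]
    simp only [List.any_eq_true, List.mem_range, Bool.and_eq_true, Bool.not_eq_true',
      beq_iff_eq, beq_eq_false_iff_ne] at h
    obtain ⟨k, hk, h1, h2⟩ := h
    constructor
    · intro h'; exact absurd h' (by norm_num)
    · intro hall; exact absurd (hall k hk h1) h2
  · rw [if_neg h]
    simp only [List.any_eq_true, List.mem_range, Bool.and_eq_true, Bool.not_eq_true',
      beq_iff_eq, beq_eq_false_iff_ne] at h
    simp only [not_exists, not_and, not_not] at h
    constructor
    · intro _ k hk h1; exact h k hk h1
    · intro _; rfl

lemma and_eq_left_iff (m e : Nat) :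
    (m &&& e = m) ↔ (∀ j, m.testBit j = true → e.testBit j = true) := by
  constructor
  · intro h j hj
    have := congrArg (fun x => x.testBit j) h
    simp only [Nat.testBit_and, hj, Bool.true_and] at this
    exact this
  · intro h
    apply Nat.eq_of_testBit_eq
    intro j
    rw [Nat.testBit_and]
    cases hb : m.testBit j
    · simp
    · simp [h j hb]

lemma cover_iff (lg : List Int) (n i : Nat) (h : i < 2 ^ n) :
    (breakFlag lg (pat n i) n = 0) ↔ (oneMask n lg &&& i = oneMask n lg) := by
  rcases Nat.eq_zero_or_pos n with hn | hn
  · subst hn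
    have h0 : oneMask 0 lg = 0 := rfl
    constructor
    · intro _; rw [h0]; simp
    · intro _; rfl
  · rw [pat, if_neg (by omega), breakFlag_eq_zero_iff, and_eq_left_iff]
    constructor
    · intro hA j hj
      rw [testBit_oneMask] at hj
      simp only [Bool.and_eq_true, decide_eq_true_eq] at hj
      obtain ⟨hjn, h1⟩ := hj
      have hx := hA (n - 1 - j) (by omega) h1
      rw [getD_bitVec _ _ _ (by omega)] at hx
      have hidx : n - 1 - (n - 1 - j) = j := by omega
      rw [hidx] at hx
      cases hb : i.testBit j
      · rw [hb] at hx; simp at hx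
      · rfl
    · intro hB k hk h1
      rw [getD_bitVec _ _ _ hk]
      have hbit : i.testBit (n - 1 - k) = true := by
        apply hB
        have hidx : n - 1 - (n - 1 - k) = k := by omega
        rw [testBit_oneMask, hidx]
        simp only [Bool.and_eq_true, decide_eq_true_eq]
        exact ⟨by omega, h1⟩
      rw [hbit]
      rfl

-- ---- XOR-selection semantics of both span constructions ----
def xorSel : List Nat → List Bool → Nat
  | _, [] => 0
  | [], _ :: _ => 0
  | m :: ms, b :: bs => (if b then m else 0) ^^^ xorSel ms bs

lemma testBit_xorSel (ms : List Nat) (bs : List Bool) (j : Nat) :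
    (xorSel ms bs).testBit j =
      ((ms.zip bs).foldr (fun p acc => xor (p.2 && p.1.testBit j) acc) false) := by
  induction ms generalizing bs with
  | nil => cases bs <;> simp [xorSel, Nat.zero_testBit]
  | cons m ms ih =>
    cases bs with
    | nil => simp [xorSel, Nat.zero_testBit]
    | cons b bs =>
      show ((if b then m else 0) ^^^ xorSel ms bs).testBit j = _
      rw [Nat.testBit_xor, ih, List.zip_cons_cons, List.foldr_cons]
      congr 1
      cases b <;> simp [Nat.zero_testBit]

lemma foldr_xor_false {α : Type} (l : List α) (f : α → Bool) (h : ∀ x ∈ l, f x = false) :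
    l.foldr (fun x acc => xor (f x) acc) false = false := by
  induction l with
  | nil => rfl
  | cons a l ih => simp [h a (by simp), ih (fun x hx => h x (by simp [hx]))]

lemma mem_coeffTuples (s : Nat) : ∀ c : List Int,
    c ∈ coeffTuples s ↔ (c.length = s ∧ ∀ x ∈ c, x = 0 ∨ x = 1) := by
  induction s with
  | zero =>
    intro c
    simp only [coeffTuples, List.mem_singleton]
    constructor
    · rintro rfl; exact ⟨rfl, by simp⟩
    · rintro ⟨h, _⟩; exact List.eq_nil_of_length_eq_zero h
  | succ s ih =>
    intro c
    constructor
    · intro hc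
      simp only [coeffTuples, List.mem_append, List.mem_map] at hc
      rcases hc with ⟨t, ht, rfl⟩ | ⟨t, ht, rfl⟩
      · obtain ⟨hl, h01⟩ := (ih t).mp ht
        refine ⟨by simp [hl], ?_⟩
        intro x hx
        rcases List.mem_cons.mp hx with rfl | hx
        · exact Or.inl rfl
        · exact h01 x hx
      · obtain ⟨hl, h01⟩ := (ih t).mp ht
        refine ⟨by simp [hl], ?_⟩
        intro x hx
        rcases List.mem_cons.mp hx with rfl | hx
        · exact Or.inr rfl
        · exact h01 x hx
    · rintro ⟨hl, h01⟩
      cases c with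
      | nil => simp at hl
      | cons x t =>
        have hxt : t ∈ coeffTuples s :=
          (ih t).mpr ⟨by simpa using hl, fun y hy => h01 y (by simp [hy])⟩
        rcases h01 x (by simp) with rfl | rfl
        · simp only [coeffTuples, List.mem_append, List.mem_map]
          exact Or.inl ⟨t, hxt, rfl⟩
        · simp only [coeffTuples, List.mem_append, List.mem_map]
          exact Or.inr ⟨t, hxt, rfl⟩

lemma coeffTuples_ne_nil (s : Nat) : coeffTuples s ≠ [] := by
  induction s with
  | zero => simp [coeffTuples]
  | succ s ih => simp [coeffTuples, ih]

lemma mod2_idem (a : Int) : PySem.Int.mod (PySem.Int.mod a 2) 2 = PySem.Int.mod a 2 := by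
  have h0 : (0:Int) ≤ PySem.Int.mod a 2 := PySem.Int.mod_nonneg _ (by omega)
  have h2 : PySem.Int.mod a 2 < 2 := PySem.Int.mod_lt _ (by omega)
  rcases (by omega : PySem.Int.mod a 2 = 0 ∨ PySem.Int.mod a 2 = 1) with h | h <;> rw [h] <;> decide

lemma parity_add_bool (a b : Int) :
    decide (PySem.Int.mod (a + b) 2 = 1) =
      xor (decide (PySem.Int.mod a 2 = 1)) (decide (PySem.Int.mod b 2 = 1)) := by
  have ha := PySem.Int.floordiv_mul_add_mod a 2
  have hb := PySem.Int.floordiv_mul_add_mod b 2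
  have hab := PySem.Int.floordiv_mul_add_mod (a + b) 2
  have h0a : (0:Int) ≤ PySem.Int.mod a 2 := PySem.Int.mod_nonneg _ (by omega)
  have h2a : PySem.Int.mod a 2 < 2 := PySem.Int.mod_lt _ (by omega)
  have h0b : (0:Int) ≤ PySem.Int.mod b 2 := PySem.Int.mod_nonneg _ (by omega)
  have h2b : PySem.Int.mod b 2 < 2 := PySem.Int.mod_lt _ (by omega)
  have h0c : (0:Int) ≤ PySem.Int.mod (a + b) 2 := PySem.Int.mod_nonneg _ (by omega)
  have h2c : PySem.Int.mod (a + b) 2 < 2 := PySem.Int.mod_lt _ (by omega)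
  rcases (by omega : PySem.Int.mod a 2 = 0 ∨ PySem.Int.mod a 2 = 1) with hx | hx <;>
    rcases (by omega : PySem.Int.mod b 2 = 0 ∨ PySem.Int.mod b 2 = 1) with hy | hy
  · have hz : PySem.Int.mod (a + b) 2 = 0 := by omega
    rw [hx, hy, hz]; decide
  · have hz : PySem.Int.mod (a + b) 2 = 1 := by omega
    rw [hx, hy, hz]; decide
  · have hz : PySem.Int.mod (a + b) 2 = 1 := by omega
    rw [hx, hy, hz]; decide
  · have hz : PySem.Int.mod (a + b) 2 = 0 := by omega
    rw [hx, hy, hz]; decide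

-- parity of the A-side column sum = xor over the selected rows
lemma colsum_parity (n : Nat) (rows : List (List Int)) : ∀ (coeff : List Int),
    (∀ x ∈ coeff, x = 0 ∨ x = 1) → ∀ j : Nat, j < n →
    decide (PySem.Int.mod (pyColSum rows coeff (n - 1 - j)) 2 = 1) =
      (xorSel (rows.map (parityMask n)) (coeff.map (· == 1))).testBit j := by
  induction rows with
  | nil =>
    intro coeff h01 j hj
    have hL : pyColSum [] coeff (n - 1 - j) = 0 := rfl
    have hR : xorSel (List.map (parityMask n) []) (coeff.map (· == 1)) = 0 := by
      rw [List.map_nil]; cases coeff <;> rfl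
    rw [hL, hR]
    simp only [Nat.zero_testBit]
    decide
  | cons r rows ih =>
    intro coeff h01 j hj
    cases coeff with
    | nil =>
      have hL : pyColSum (r :: rows) [] (n - 1 - j) = 0 := by
        unfold pyColSum; rw [List.zip_nil_right]; rfl
      have hR : xorSel (List.map (parityMask n) (r :: rows)) (List.map (· == 1) ([] : List Int)) = 0 := by
        rw [List.map_cons, List.map_nil]; rfl
      rw [hL, hR]
      simp only [Nat.zero_testBit]
      decide
    | cons c cs =>
      have hL : pyColSum (r :: rows) (c :: cs) (n - 1 - j) =
          r.getD (n - 1 - j) 0 * c + pyColSum rows cs (n - 1 - j) := by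
        unfold pyColSum
        rw [List.map_cons, List.zip_cons_cons, List.foldl_cons]
        rw [PySem.List.foldl_add (g := fun p : Int × Int => p.1 * p.2)]
        rw [PySem.List.foldl_add (g := fun p : Int × Int => p.1 * p.2)]
        ring
      rw [hL, parity_add_bool, List.map_cons, List.map_cons]
      simp only [xorSel]
      rw [Nat.testBit_xor]
      rw [← ih cs (fun x hx => h01 x (by simp [hx])) j hj]
      congr 1
      rcases h01 c (by simp) with rfl | rfl
      · simp only [mul_zero]
        have : ((0:Int) == 1) = false := rfl
        rw [this]
        simp only [Bool.false_eq_true, if_false, Nat.zero_testBit]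
        decide
      · simp only [mul_one]
        have : ((1:Int) == 1) = true := rfl
        rw [this]
        simp only [if_true]
        rw [testBit_parityMask]
        simp [hj]

-- the support mask of the logical operator built from one coefficient tuple
lemma oneMask_logical (n m : Nat) (stab : List (List Int)) (log : List Int) (coeff : List Int)
    (hm : n ≤ m) (h01 : ∀ x ∈ coeff, x = 0 ∨ x = 1) :
    oneMask n ((List.range m).map (fun j =>
      PySem.Int.mod
        (((List.range m).map (fun i => PySem.Int.mod (pyColSum stab coeff i) 2)).getD j 0
          + log.getD j 0) 2))
    = xorSel (stab.map (parityMask n)) (coeff.map (· == 1)) ^^^ parityMask n log := by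
  apply Nat.eq_of_testBit_eq
  intro j
  rw [testBit_oneMask, Nat.testBit_xor]
  by_cases hjn : j < n
  · have hjm : n - 1 - j < m := by omega
    rw [PySem.List.getD_map_range _ _ _ _ hjm, PySem.List.getD_map_range _ _ _ _ hjm]
    simp only [hjn, decide_true, Bool.true_and]
    rw [parity_add_bool, mod2_idem]
    rw [colsum_parity n stab coeff h01 j hjn]
    rw [testBit_parityMask]
    simp [hjn]
  · simp only [hjn, decide_false, Bool.false_and]
    have h1 : (xorSel (stab.map (parityMask n)) (coeff.map (· == 1))).testBit j = false := by
      rw [testBit_xorSel]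
      apply foldr_xor_false _ (fun p : Nat × Bool => p.2 && p.1.testBit j)
      intro p hp
      obtain ⟨hp1, _⟩ := List.of_mem_zip hp
      obtain ⟨row, _, hrow⟩ := List.mem_map.mp hp1
      rw [← hrow, testBit_parityMask]
      simp [hjn]
    have h2 : (parityMask n log).testBit j = false := by
      rw [testBit_parityMask]; simp [hjn]
    rw [h1, h2]
    rfl

-- the image of A's logicals under oneMask = the semantic set, nonempty-stabilizer case
lemma image_createLogicals (n : Nat) (stab : List (List Int)) (log : List Int)
    (hs : stab ≠ []) (hm : n ≤ (stab.headD []).length) (y : Nat) :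
    (∃ lg ∈ createLogicals stab log, oneMask n lg = y) ↔
      (∃ bs : List Bool, bs.length = stab.length ∧
        y = xorSel (stab.map (parityMask n)) bs ^^^ parityMask n log) := by
  have hspan : spanList stab = (coeffTuples stab.length).map (fun coeff =>
      (List.range (stab.headD []).length).map (fun i => PySem.Int.mod (pyColSum stab coeff i) 2)) := by
    unfold spanList; rw [if_neg hs]
  have hspan_ne : spanList stab ≠ [] := by
    rw [hspan]; simp [coeffTuples_ne_nil]
  have hcl : createLogicals stab log = (spanList stab).map (fun v =>
      (List.range v.length).map (fun j => PySem.Int.mod (v.getD j 0 + log.getD j 0) 2)) := by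
    unfold createLogicals; rw [if_pos hspan_ne]
  constructor
  · rintro ⟨lg, hlg, rfl⟩
    rw [hcl, hspan, List.map_map] at hlg
    obtain ⟨coeff, hcmem, rfl⟩ := List.mem_map.mp hlg
    obtain ⟨hclen, h01⟩ := (mem_coeffTuples stab.length coeff).mp hcmem
    refine ⟨coeff.map (· == 1), by simp [hclen], ?_⟩
    simp only [Function.comp, List.length_map, List.length_range]
    exact (oneMask_logical n (stab.headD []).length stab log coeff hm h01).symm ▸ rfl
  · rintro ⟨bs, hlen, rfl⟩
    have h01 : ∀ x ∈ bs.map (fun b => if b then (1:Int) else 0), x = 0 ∨ x = 1 := by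
      intro x hx
      obtain ⟨b, _, rfl⟩ := List.mem_map.mp hx
      cases b
      · exact Or.inl rfl
      · exact Or.inr rfl
    have hbs : (bs.map (fun b => if b then (1:Int) else 0)).map (· == 1) = bs := by
      rw [List.map_map]
      have hcomp : ((fun x : Int => x == 1) ∘ fun b : Bool => if b then (1:Int) else 0) = id := by
        funext b; cases b <;> rfl
      rw [hcomp, List.map_id]
    have hcmem : bs.map (fun b => if b then (1:Int) else 0) ∈ coeffTuples stab.length :=
      (mem_coeffTuples _ _).mpr ⟨by simp [hlen], h01⟩
    refine ⟨(fun v => (List.range v.length).map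
        (fun j => PySem.Int.mod (v.getD j 0 + log.getD j 0) 2))
        ((List.range (stab.headD []).length).map
          (fun i => PySem.Int.mod (pyColSum stab (bs.map (fun b => if b then (1:Int) else 0)) i) 2)),
      ?_, ?_⟩
    · rw [hcl, hspan, List.map_map]
      exact List.mem_map.mpr ⟨bs.map (fun b => if b then (1:Int) else 0), hcmem, rfl⟩
    · simp only [List.length_map, List.length_range]
      rw [oneMask_logical n (stab.headD []).length stab log _ hm h01, hbs]

lemma mem_spanFold (n : Nat) (rows : List (List Int)) : ∀ (sp : List Nat) (y : Nat),
    (y ∈ rows.foldl (fun sp row => PySem.Set.union sp (sp.map (fun s => s ^^^ parityMask n row))) sp) ↔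
      ∃ s ∈ sp, ∃ bs : List Bool, bs.length = rows.length ∧
        y = s ^^^ xorSel (rows.map (parityMask n)) bs := by
  induction rows with
  | nil =>
    intro sp y
    constructor
    · intro h
      exact ⟨y, h, [], rfl, by simp [xorSel]⟩
    · rintro ⟨s, hs, bs, hlen, rfl⟩
      have hb : bs = [] := List.eq_nil_of_length_eq_zero hlen
      subst hb
      simpa [xorSel] using hs
  | cons r rows ih =>
    intro sp y
    rw [List.foldl_cons, ih]
    constructor
    · rintro ⟨s', hs', bs, hlen, rfl⟩
      rcases (PySem.Set.mem_union _ _ _).mp hs' with h | h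
      · exact ⟨s', h, false :: bs, by simp [hlen], by simp [xorSel]⟩
      · obtain ⟨s, hsmem, rfl⟩ := List.mem_map.mp h
        exact ⟨s, hsmem, true :: bs, by simp [hlen], by simp [xorSel, Nat.xor_assoc]⟩
    · rintro ⟨s, hs, bs, hlen, rfl⟩
      cases bs with
      | nil => simp at hlen
      | cons b bs =>
        cases b
        · exact ⟨s, (PySem.Set.mem_union _ _ _).mpr (Or.inl hs), bs, by simpa using hlen,
            by simp [xorSel]⟩
        · exact ⟨s ^^^ parityMask n r,
            (PySem.Set.mem_union _ _ _).mpr (Or.inr (List.mem_map.mpr ⟨s, hs, rfl⟩)), bs,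
            by simpa using hlen, by simp [xorSel, Nat.xor_assoc]⟩

-- B's span fold membership
lemma mem_logicalMasks (n : Nat) (stab : List (List Int)) (log : List Int) (hs : stab ≠ []) (y : Nat) :
    y ∈ logicalMasks n stab log ↔
      (∃ bs : List Bool, bs.length = stab.length ∧
        y = xorSel (stab.map (parityMask n)) bs ^^^ parityMask n log) := by
  unfold logicalMasks
  rw [if_neg hs, PySem.Set.mem_ofList, List.mem_map]
  constructor
  · rintro ⟨s', hs', rfl⟩
    obtain ⟨s, hsp, bs, hlen, rfl⟩ := (mem_spanFold n stab _ s').mp hs'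
    have hs0 : s = 0 := by simpa [PySem.Set.ofList] using hsp
    subst hs0
    exact ⟨bs, hlen, by simp⟩
  · rintro ⟨bs, hlen, rfl⟩
    refine ⟨xorSel (stab.map (parityMask n)) bs, ?_, rfl⟩
    exact (mem_spanFold n stab _ _).mpr ⟨0, by simp [PySem.Set.ofList], bs, hlen, by simp⟩

lemma set_any_union (s t : PySem.Set Nat) (f : Nat → Bool) :
    (PySem.Set.union s t).any f = (s.any f || t.any f) := by
  rw [Bool.eq_iff_iff]
  simp only [List.any_eq_true, Bool.or_eq_true, PySem.Set.mem_union]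
  constructor
  · rintro ⟨x, h | h, hf⟩
    · exact Or.inl ⟨x, h, hf⟩
    · exact Or.inr ⟨x, h, hf⟩
  · rintro (⟨x, h, hf⟩ | ⟨x, h, hf⟩)
    · exact ⟨x, Or.inl h, hf⟩
    · exact ⟨x, Or.inr h, hf⟩

-- one side's scan = the other side's mask test, per pattern
lemma scan_eq_maskAny (n : Nat) (stab : List (List Int)) (log : List Int)
    (hm : stab = [] ∨ n ≤ (stab.headD []).length)
    (i : Nat) (h : i < 2 ^ n) :
    scanLogs (createLogicals stab log) (pat n i) n =
      (logicalMasks n stab log).any (fun m => m &&& i == m) := by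
  by_cases hs : stab = []
  · subst hs
    have hcl : createLogicals [] log = [log] := rfl
    have hlm : logicalMasks n [] log = [oneMask n log] := rfl
    rw [hcl, hlm, Bool.eq_iff_iff]
    simp only [scanLogs, List.any_eq_true, List.mem_singleton, beq_iff_eq]
    constructor
    · rintro ⟨lg, rfl, hflag⟩
      exact ⟨oneMask n lg, rfl, (cover_iff lg n i h).mp hflag⟩
    · rintro ⟨m, rfl, hsub⟩
      exact ⟨log, rfl, (cover_iff log n i h).mpr hsub⟩
  · have hm' : n ≤ (stab.headD []).length := hm.resolve_left hs
    rw [Bool.eq_iff_iff]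
    simp only [scanLogs, List.any_eq_true, beq_iff_eq]
    constructor
    · rintro ⟨lg, hlg, hflag⟩
      obtain ⟨bs, hlen, hy⟩ :=
        (image_createLogicals n stab log hs hm' (oneMask n lg)).mp ⟨lg, hlg, rfl⟩
      refine ⟨oneMask n lg, ?_, (cover_iff lg n i h).mp hflag⟩
      exact (mem_logicalMasks n stab log hs _).mpr ⟨bs, hlen, hy⟩
    · rintro ⟨m, hmem, hsub⟩
      obtain ⟨bs, hlen, rfl⟩ := (mem_logicalMasks n stab log hs _).mp hmem
      obtain ⟨lg, hlg, hmask⟩ :=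
        (image_createLogicals n stab log hs hm' _).mpr ⟨bs, hlen, rfl⟩
      exact ⟨lg, hlg, (cover_iff lg n i h).mpr (by rw [hmask]; exact hsub)⟩

lemma erasure_unfold (xs : List (List Int)) (xl : List Int) (zs : List (List Int)) (zl : List Int) :
    erasure xs xl zs zl =
    ((createErasurePatterns (xs.headD []).length).foldl
      (fun acc err =>
        if scanLogs (createLogicals xs xl) err (xs.headD []).length then acc ++ [err]
        else if scanLogs (createLogicals zs zl) err (xs.headD []).length then acc ++ [err]
        else acc) []).foldl
      (fun d err => PySem.List.pySetD d err.sum (PySem.List.pyGetD d err.sum 0 + 1))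
      (List.replicate ((xs.headD []).length + 1) 0) := rfl

lemma erasure_alt_unfold (xs : List (List Int)) (xl : List Int) (zs : List (List Int)) (zl : List Int) :
    erasure_alt xs xl zs zl =
    (List.range (2 ^ (xs.headD []).length)).foldl
      (fun d e =>
        if (PySem.Set.union (logicalMasks (xs.headD []).length xs xl)
            (logicalMasks (xs.headD []).length zs zl)).any (fun m => m &&& e == m) then
          d.set (popcnt e) (d.getD (popcnt e) 0 + 1)
        else d)
      (List.replicate ((xs.headD []).length + 1) 0) := rfl

-- ===== VERDICT (by name: the statement is the Claim_ definition above) =====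
theorem erasure_spec : Claim_equal_erasure := by
  intro xs xl zs zl _ hpre
  obtain ⟨hxne, hxrows, hxlog, hz⟩ := hpre
  show erasure xs xl zs zl = erasure_alt xs xl zs zl
  have hzm : zs = [] ∨ (xs.headD []).length ≤ (zs.headD []).length := by
    by_cases hzs : zs = []
    · exact Or.inl hzs
    · rw [if_neg hzs] at hz; exact Or.inr hz.1
  rw [erasure_unfold, erasure_alt_unfold]
  have hfun : (fun (acc : List (List Int)) err =>
        if scanLogs (createLogicals xs xl) err (xs.headD []).length then acc ++ [err]
        else if scanLogs (createLogicals zs zl) err (xs.headD []).length then acc ++ [err]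
        else acc)
      = (fun (acc : List (List Int)) err =>
        if (scanLogs (createLogicals xs xl) err (xs.headD []).length ||
            scanLogs (createLogicals zs zl) err (xs.headD []).length) then acc ++ [err]
        else acc) := by
    funext acc err
    cases h1 : scanLogs (createLogicals xs xl) err (xs.headD []).length <;>
      cases h2 : scanLogs (createLogicals zs zl) err (xs.headD []).length <;> simp
  rw [hfun, PySem.List.foldl_append_if_eq_filter, List.nil_append]
  rw [patterns_eq, List.filter_map, List.foldl_map]
  rw [← PySem.List.foldl_if_eq_foldl_filter]
  apply PySem.List.foldl_congr_mem
  intro d i hi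
  rw [List.mem_range] at hi
  have hx_scan := scan_eq_maskAny (xs.headD []).length xs xl (Or.inr (le_refl _)) i hi
  have hz_scan := scan_eq_maskAny (xs.headD []).length zs zl hzm i hi
  have hcond : (scanLogs (createLogicals xs xl) (pat (xs.headD []).length i) (xs.headD []).length ||
      scanLogs (createLogicals zs zl) (pat (xs.headD []).length i) (xs.headD []).length)
      = (PySem.Set.union (logicalMasks (xs.headD []).length xs xl)
          (logicalMasks (xs.headD []).length zs zl)).any (fun m => m &&& i == m) := by
    rw [hx_scan, hz_scan, set_any_union]
  simp only [Function.comp_apply]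
  simp only [hcond]
  split
  · rw [sum_pat _ i hi]
    simp [PySem.List.pySetD_natCast, PySem.List.pyGetD_natCast]
  · rfl
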